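-- pv_equiv track=rewrite | github.com/thierryxdp/TCC | problems/835/solution_345576.py | melhor_volta
-- ===== SOURCE A (Python) =====
-- def melhor_volta(lista):
--     """Dado uma matriz com os tempos dos corredores em cada volta, a função retorna uma tupla informando quem obteve a melhor volta, o tempo dessa volta e o número da volta, respectivamente;
--     lista[list...]->tuple"""
--     avaliacao=[]
--     for i in range(len(lista)):
--         list.append(avaliacao,min(lista[i]))
--     tempo= min(avaliacao)
--     corredor=list.index(avaliacao,tempo)+1
--     volta=list.index(lista[corredor-1],tempo)+1
--     return (corredor,tempo,volta)
-- ===== SOURCE B (Python) =====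
-- def melhor_volta(lista):
--     """Single pass: keep a running best (runner, time, lap) using strict '<'
--     so the first row achieving the overall minimum wins, as Python's min/index do."""
--     best = None
--     for i, row in enumerate(lista):
--         t = min(row)
--         if best is None or t < best[1]:
--             best = (i + 1, t, row.index(t) + 1)
--     if best is None:
--         raise ValueError("melhor_volta() arg is an empty sequence")
--     return best
-- ===== Notes on version B (the rewrite author's own statement) =====
-- stated objective: simpler
-- what changed: A's four phases (build the list of per-row minima, take its min, scan it for the index, scan the winning row again) are merged into one running-best pass over enumerate(lista) that records (runner, time, lap) inline, using strict '<' to keep first-occurrence tie-breaking.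
import Mathlib
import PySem

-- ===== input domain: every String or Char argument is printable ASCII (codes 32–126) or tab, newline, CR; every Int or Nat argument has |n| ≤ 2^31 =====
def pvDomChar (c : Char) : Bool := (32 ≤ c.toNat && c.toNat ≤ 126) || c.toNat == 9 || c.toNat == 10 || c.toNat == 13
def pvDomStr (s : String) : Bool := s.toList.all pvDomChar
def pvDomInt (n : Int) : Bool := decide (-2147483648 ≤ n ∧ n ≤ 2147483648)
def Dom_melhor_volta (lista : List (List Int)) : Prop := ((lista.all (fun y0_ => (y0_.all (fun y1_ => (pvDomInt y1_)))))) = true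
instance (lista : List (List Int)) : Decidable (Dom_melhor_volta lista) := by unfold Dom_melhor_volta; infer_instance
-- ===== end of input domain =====

-- B replaces A's four phases (build the list of row minima, min over it, index scan, inner index scan)
-- by one running-best pass over enumerate(lista); same return value (objective: simpler).

-- ===== PORT A =====
def melhor_volta (lista : List (List Int)) : Int × Int × Int :=
  let avaliacao := (PySem.List.pyRange 0 lista.length 1).foldl
    (fun acc i => acc ++ [(PySem.List.min? (PySem.List.pyGetD lista i []) (fun y => y)).getD 0]) []
  let tempo := (PySem.List.min? avaliacao (fun y => y)).getD 0
  let corredor : Int := ((PySem.List.index? avaliacao tempo).getD 0 : Int) + 1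
  let volta : Int := ((PySem.List.index? (PySem.List.pyGetD lista (corredor - 1) []) tempo).getD 0 : Int) + 1
  (corredor, tempo, volta)

-- ===== PORT B =====
def melhor_volta_alt (lista : List (List Int)) : Int × Int × Int :=
  ((PySem.List.enumerate lista 0).foldl
    (fun best p =>
      let t := (PySem.List.min? p.2 (fun y => y)).getD 0
      match best with
      | none => some (p.1 + 1, t, ((PySem.List.index? p.2 t).getD 0 : Int) + 1)
      | some b =>
        if t < b.2.1 then some (p.1 + 1, t, ((PySem.List.index? p.2 t).getD 0 : Int) + 1)
        else some b)
    none).getD (0, 0, 0)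

-- ===== PRECONDITION & SPEC =====
-- Pre_ excludes exactly the inputs where Python A raises ValueError: an empty outer list
-- (min of the empty avaliacao) or any empty row (min of an empty row).
def Pre_melhor_volta (lista : List (List Int)) : Prop := lista ≠ [] ∧ ∀ r ∈ lista, r ≠ []
instance (lista : List (List Int)) : Decidable (Pre_melhor_volta lista) := by unfold Pre_melhor_volta; infer_instance
def pvWitness_melhor_volta : List (List Int) := [[3, 1], [2, 1, 4]]
def Spec_melhor_volta (lista : List (List Int)) (out : Int × Int × Int) : Prop := out = melhor_volta_alt lista
instance (lista : List (List Int)) (out : Int × Int × Int) : Decidable (Spec_melhor_volta lista out) := by unfold Spec_melhor_volta; infer_instance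

-- ===== CLAIM (what is proved, stated in full; the proofs are below) =====
def Claim_equal_melhor_volta : Prop := ∀ (lista : List (List Int)), Dom_melhor_volta lista → Pre_melhor_volta lista → Spec_melhor_volta lista (melhor_volta lista)

-- ===== LEMMAS AND PROOFS =====

-- minimum of a row, as both ports compute it
def minI (r : List Int) : Int := (PySem.List.min? r (fun y => y)).getD 0
-- 1-based first index of t in r, as both ports compute it
def idxI (r : List Int) (t : Int) : Int := ((PySem.List.index? r t).getD 0 : Int) + 1

-- common reference recursion: first row achieving the minimum of the row minima
def refA : List (List Int) → Int × Int × Int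
  | [] => (0, 0, 0)
  | [r] => (1, minI r, idxI r (minI r))
  | r :: s :: rest =>
      let p := refA (s :: rest)
      if minI r ≤ p.2.1 then (1, minI r, idxI r (minI r)) else (p.1 + 1, p.2.1, p.2.2)

lemma foldl_min_comm (t : List Int) : ∀ (x y : Int), t.foldl min (min x y) = min x (t.foldl min y) := by
  induction t with
  | nil => intro x y; simp
  | cons a t ih =>
    intro x y
    simp only [List.foldl_cons]
    rw [min_assoc, ih]

lemma ref_tempo : ∀ (r : List Int) (rest : List (List Int)),
    (refA (r :: rest)).2.1 = (rest.map minI).foldl min (minI r) := by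
  intro r rest
  induction rest generalizing r with
  | nil => simp [refA]
  | cons s rest ih =>
    have hs := ih s
    simp only [refA, List.map_cons, List.foldl_cons]
    rw [foldl_min_comm, ← hs]
    by_cases h : minI r ≤ (refA (s :: rest)).2.1
    · rw [if_pos h]; simp; omega
    · rw [if_neg h]; simp; omega

lemma ref_char : ∀ (r : List Int) (rest : List (List Int)),
    ∃ k : Nat,
      PySem.List.index? ((r :: rest).map minI) ((refA (r :: rest)).2.1) = some k ∧
      (refA (r :: rest)).1 = (k : Int) + 1 ∧
      (∃ hk : k < (r :: rest).length,
        (refA (r :: rest)).2.2 = idxI ((r :: rest)[k]) ((refA (r :: rest)).2.1)) := by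
  intro r rest
  induction rest generalizing r with
  | nil =>
    refine ⟨0, ?_, by simp [refA], ⟨by simp, ?_⟩⟩
    · simp [refA]
    · simp [refA]
  | cons s rest ih =>
    by_cases h : minI r ≤ (refA (s :: rest)).2.1
    · refine ⟨0, ?_, ?_, ⟨by simp, ?_⟩⟩
      · simp only [refA, if_pos h, List.map_cons]
        exact PySem.List.index?_cons_self _ _
      · simp [refA, if_pos h]
      · simp [refA, if_pos h]
    · obtain ⟨k, hidx, hfst, hk, hv⟩ := ih s
      have hne : minI r ≠ (refA (s :: rest)).2.1 := by omega
      refine ⟨k + 1, ?_, ?_, ⟨by simpa using Nat.succ_lt_succ hk, ?_⟩⟩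
      · rw [List.map_cons] at hidx
        simp only [refA, if_neg h, List.map_cons]
        rw [PySem.List.index?_cons_of_ne (h := hne), hidx]
        rfl
      · simp only [refA, if_neg h]
        push_cast
        omega
      · simp only [refA, if_neg h]
        simpa using hv

-- A computes refA on nonempty input
lemma A_eq_ref (r : List Int) (rest : List (List Int)) :
    melhor_volta (r :: rest) = refA (r :: rest) := by
  have hav : (PySem.List.pyRange 0 (r :: rest).length 1).foldl
      (fun acc i => acc ++ [(PySem.List.min? (PySem.List.pyGetD (r :: rest) i []) (fun y => y)).getD 0]) []
      = (r :: rest).map minI := by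
    rw [PySem.List.foldl_pyRange_zero_pyGetD' (r :: rest) []
      (fun acc row => acc ++ [(PySem.List.min? row (fun y => y)).getD 0]) []]
    simpa [minI] using PySem.List.foldl_append_singleton_eq_map
      (fun row => (PySem.List.min? row (fun y => y)).getD 0) (r :: rest) []
  have htempo : (PySem.List.min? ((r :: rest).map minI) (fun y => y)).getD 0
      = (refA (r :: rest)).2.1 := by
    rw [List.map_cons, PySem.List.min?_id_cons, ref_tempo]
    rfl
  obtain ⟨k, hidx, hfst, hk, hv⟩ := ref_char r rest
  show ((((PySem.List.index? _ _).getD 0 : Int) + 1), _, _) = _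
  rw [hav, htempo, hidx]
  have hget : PySem.List.pyGetD (r :: rest) ((k : Int) + 1 - 1) [] = (r :: rest)[k] := by
    rw [show ((k:Int)+1-1) = ((k:Nat):Int) by omega, PySem.List.pyGetD_natCast]
    simp [List.getD_eq_getElem?_getD, List.getElem?_eq_getElem hk]
  refine Prod.ext ?_ (Prod.ext rfl ?_)
  · simpa using hfst.symm
  · show ((PySem.List.index? (PySem.List.pyGetD (r :: rest) (((k:Nat):Int) + 1 - 1) []) _).getD 0 : Int) + 1 = _
    rw [hget, hv]
    rfl

-- B's step function, named for the proofs (definitionally the fold body of melhor_volta_alt)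
def stepB (best : Option (Int × Int × Int)) (p : Int × List Int) : Option (Int × Int × Int) :=
  match best with
  | none => some (p.1 + 1, minI p.2, idxI p.2 (minI p.2))
  | some b => if minI p.2 < b.2.1 then some (p.1 + 1, minI p.2, idxI p.2 (minI p.2)) else some b

lemma alt_eq_stepB (lista : List (List Int)) :
    melhor_volta_alt lista = ((PySem.List.enumerate lista 0).foldl stepB none).getD (0, 0, 0) := by
  rfl

lemma refA_cons_le (r s : List Int) (rest : List (List Int))
    (h : minI r ≤ (refA (s :: rest)).2.1) :
    refA (r :: s :: rest) = (1, minI r, idxI r (minI r)) := by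
  simp [refA, if_pos h]

lemma refA_cons_gt (r s : List Int) (rest : List (List Int))
    (h : ¬ minI r ≤ (refA (s :: rest)).2.1) :
    refA (r :: s :: rest)
      = ((refA (s :: rest)).1 + 1, (refA (s :: rest)).2.1, (refA (s :: rest)).2.2) := by
  simp [refA, if_neg h]

-- B's running-best fold, started from a recorded best, computes refA of the remaining rows
lemma B_run : ∀ (rest : List (List Int)) (i : Int) (b : Int × Int × Int),
    (PySem.List.enumerate rest i).foldl stepB (some b)
    = some (match rest with
            | [] => b
            | _ :: _ =>
              if (refA rest).2.1 < b.2.1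
              then ((refA rest).1 + i, (refA rest).2.1, (refA rest).2.2)
              else b) := by
  intro rest
  induction rest with
  | nil => intro i b; simp [PySem.List.enumerate_nil]
  | cons r rest ih =>
    intro i b
    rw [PySem.List.enumerate_cons, List.foldl_cons]
    show (PySem.List.enumerate rest (i + 1)).foldl stepB (stepB (some b) (i, r)) = _
    simp only [stepB]
    by_cases ht : minI r < b.2.1
    · rw [if_pos ht, ih]
      cases rest with
      | nil =>
        simp only [refA]
        rw [if_pos (by omega)]
        simp [Prod.ext_iff]; omega
      | cons s rest' =>
        by_cases h2 : minI r ≤ (refA (s :: rest')).2.1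
        · rw [refA_cons_le r s rest' h2, if_neg (by simp; omega), if_pos (by omega)]
          simp [Prod.ext_iff]; omega
        · rw [refA_cons_gt r s rest' h2, if_pos (by simp; omega), if_pos (by simp; omega)]
          simp [Prod.ext_iff]; omega
    · rw [if_neg ht, ih]
      cases rest with
      | nil =>
        simp only [refA]
        rw [if_neg (by omega)]
      | cons s rest' =>
        by_cases h2 : minI r ≤ (refA (s :: rest')).2.1
        · rw [refA_cons_le r s rest' h2, if_neg (by omega), if_neg (by omega)]
        · rw [refA_cons_gt r s rest' h2]
          by_cases h3 : (refA (s :: rest')).2.1 < b.2.1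
          · rw [if_pos h3, if_pos (by omega)]
            simp [Prod.ext_iff]; omega
          · rw [if_neg h3, if_neg (by omega)]

lemma B_eq_ref (r : List Int) (rest : List (List Int)) :
    melhor_volta_alt (r :: rest) = refA (r :: rest) := by
  rw [alt_eq_stepB, PySem.List.enumerate_cons, List.foldl_cons]
  show ((PySem.List.enumerate rest (0 + 1)).foldl stepB (stepB none (0, r))).getD (0, 0, 0) = _
  simp only [stepB]
  rw [B_run]
  cases rest with
  | nil => simp [refA]
  | cons s rest' =>
    by_cases h2 : minI r ≤ (refA (s :: rest')).2.1
    · rw [refA_cons_le r s rest' h2, if_neg (by simp; omega)]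
      simp
    · rw [refA_cons_gt r s rest' h2, if_pos (by simp; omega)]
      simp

-- ===== VERDICT (by name: the statement is the Claim_ definition above) =====
theorem melhor_volta_spec : Claim_equal_melhor_volta := by
  intro lista _ hpre
  unfold Spec_melhor_volta
  cases lista with
  | nil => exact absurd rfl hpre.1
  | cons r rest => rw [A_eq_ref, B_eq_ref]
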